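/- GENERATED by tools/from_farm_form.py from farm/worked/pow/Proof.lean (a worked proof of the farm's unit `pow`,
   accepted by the verdict) — do not edit. -/
import Asan.CheckWalk
import ProgX.Base.Spec.Units.pow

open X86 X86.User Asan ProgX.Base

set_option maxRecDepth 4000
set_option maxHeartbeats 4000000

namespace ProgX.Base.Spec.Proved.pow
open ProgX.Base.Spec.pow (Statement)

/-- 0x102cdc, libm.c:164 `if (x > 0.0) {`: the general case (`exp(y * log(x))`, `0.0` or NaN), where the four exits of the
integer-exponent test (libm.c:158, 160) meet. No label of Vorbis/Labels.lean names it: it is a join, not a contract cut. -/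
abbrev cutGeneral_w : Word := ProgX.Base.L.pow.entry + 60

/-- 0x102d05, libm.c:171 `}`: the epilogue `add rsp, 8 ; ret`, where all five `return`s meet. -/
abbrev cutEpilogue_w : Word := ProgX.Base.L.pow.entry + 101

/-- The ABI invariant (DF = 0, the six SSE exception masks set) of a state whose flags are a STATUS update of flags with DF = 0
(a compare: DF is not a status flag) and whose MXCSR is a word with the masks. Stated with named hypotheses because `v_inv`'s
`assumption` is slow next to the `hbr_…` hypotheses of the float compares. -/
theorem inv_of_status_w {s : State} {f : Flags} {st : StatusFlags} {mx : Word} (hf : s.flags = f.setStatus st)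
    (hdf : f .df = false) (hm : s.mxcsr = mx) (hmx : mx &&& 8064 = 8064) : abiInv s := by
  refine ProgX.Base.abiInv_of ?_ ?_
  · rw [hf, X86.User.df_setStatus]
    exact hdf
  · rw [hm]
    exact hmx

/-- The same for a state whose flags are those of a state with DF = 0 (a `jmp`, a `call`, an SSE arithmetic instruction). -/
theorem inv_of_eq_w {s : State} {f : Flags} {mx : Word} (hf : s.flags = f) (hdf : f .df = false) (hm : s.mxcsr = mx)
    (hmx : mx &&& 8064 = 8064) : abiInv s := by
  refine ProgX.Base.abiInv_of ?_ ?_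
  · rw [hf]
    exact hdf
  · rw [hm]
    exact hmx

/-- **The epilogue** (0x102d05 `add rsp, 8 ; ret`, libm.c:171): from any state at `cutEpilogue_w` whose stack pointer is the entry's
minus 8, whose callee-saved registers are the entry's, and whose memory differs from the entry's inside the frame only, the
function returns with its contract's `Returned`. Every `return` of `pow` ends here. -/
theorem from_epilogue_w {Lay : Layout} {μ : Microarch} (hμ : UserX.MicroOK μ) {u₀ : State}
    (hcode : HasCodeNat Lay u₀ ProgX.Base.L.pow.entry ProgX.Base.Code.code_pow.nat ProgX.Base.L.pow.size)
    (others : List Obj) (frames : List (Nat × FrameLayout)) {u : State} {ret : Word}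
    (he_retAddr : UInt64.ofNat (u.mem.readLE (u.reg Reg.rsp) 8) = ret)
    (he_ret_lt : ret < 1073741824)
    (he_room : 7340032 + 56 ≤ UInt64.toNat (u.reg Reg.rsp))
    (he_top : UInt64.toNat (u.reg Reg.rsp) + 8 ≤ 8388608)
    (he_stack : Lay.Has (u.reg Reg.rsp - 56) 64)
    (s : State)
    (w_rip : s.rip = cutEpilogue_w)
    (w_rsp : s.reg .rsp = u.reg .rsp - 8)
    (w_kept : RegsKept [.rax, .rcx, .rdx, .rsi, .rdi, .rsp, .r8, .r9, .r10, .r11, .r16, .r17, .r18, .r19, .r20, .r21, .r22,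
      .r23, .r24, .r25, .r26, .r27, .r28, .r29, .r30, .r31] u s)
    (hsame : Mem.SameExcept [⟨(u.reg .rsp).toNat - 56, (u.reg .rsp).toNat⟩] u.mem s.mem)
    (hinv : abiInv s)
    (w_eq : Mem.EqOn ProgX.Base.L.textLo ProgX.Base.L.textHi u₀.mem s.mem) :
    ReachVia Lay μ WayInv s (Returned (conv u₀) (ProgX.Base.Spec.pow.spec others frames) u ret) := by
  have hdf : s.flags .df = false := hinv.1
  have hmx : s.mxcsr &&& 8064 = 8064 := hinv.2
  -- the return address: its slot is above the frame
  have hret : UInt64.ofNat (s.mem.readLE (u.reg .rsp) 8) = ret := by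
    u_frame he_retAddr
  -- the shadow: the frame is in the stack region, below the shadow
  have hun : ShadowUntouched u.mem s.mem := by
    v_untouched
  u_walk hcode [hμ.vendor] span [ProgX.Base.L.textLo, ProgX.Base.L.textHi] side (v_side)
  refine ReachVia.done ?_
  v_returned
  -- the post: no shadow byte written
  show ShadowUntouched u.mem s_102d09.mem
  rw [w_mem]
  exact hun

/-- **The general case** (0x102cdc … 0x102d04 and 0x102d11 … 0x102d26; libm.c:164–170): from any state at `cutGeneral_w` with the
frame allocated, `pow` returns: `x > 0.0` calls `log`, multiplies by the spilled `y`, calls `exp` (libm.c:165); `x == 0.0 && y > 0.0`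
returns `0.0` (libm.c:168); everything else returns a NaN (libm.c:170). All arms end at `cutEpilogue_w`. -/
theorem from_general_w {Lay : Layout} (hLay : Lay.hi = 0x1000000) {μ : Microarch} (hμ : UserX.MicroOK μ) {u₀ : State}
    (hcode : HasCodeNat Lay u₀ ProgX.Base.L.pow.entry ProgX.Base.Code.code_pow.nat ProgX.Base.L.pow.size)
    (others : List Obj) (frames : List (Nat × FrameLayout))
    (hlog : Calls Lay μ ProgX.Base.WayInv (ProgX.Base.conv u₀) ProgX.Base.L.log.entry (ProgX.Base.Spec.log.spec others frames))
    (hexp : Calls Lay μ ProgX.Base.WayInv (ProgX.Base.conv u₀) ProgX.Base.L.exp.entry (ProgX.Base.Spec.exp.spec others frames))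
    {u : State} {ret : Word}
    (hpre : ShadowPre others frames u)
    (he_retAddr : UInt64.ofNat (u.mem.readLE (u.reg Reg.rsp) 8) = ret)
    (he_ret_lt : ret < 1073741824)
    (he_align : UInt64.toNat (u.reg Reg.rsp) % 8 = 0)
    (he_room : 7340032 + 56 ≤ UInt64.toNat (u.reg Reg.rsp))
    (he_top : UInt64.toNat (u.reg Reg.rsp) + 8 ≤ 8388608)
    (he_stack : Lay.Has (u.reg Reg.rsp - 56) 64)
    (s : State)
    (w_rip : s.rip = cutGeneral_w)
    (w_rsp : s.reg .rsp = u.reg .rsp - 8)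
    (w_kept : RegsKept [.rax, .rcx, .rdx, .rsi, .rdi, .rsp, .r8, .r9, .r10, .r11, .r16, .r17, .r18, .r19, .r20, .r21, .r22,
      .r23, .r24, .r25, .r26, .r27, .r28, .r29, .r30, .r31] u s)
    (hsame : Mem.SameExcept [⟨(u.reg .rsp).toNat - 56, (u.reg .rsp).toNat⟩] u.mem s.mem)
    (hinv : abiInv s)
    (w_eq : Mem.EqOn ProgX.Base.L.textLo ProgX.Base.L.textHi u₀.mem s.mem) :
    ReachVia Lay μ WayInv s (Returned (conv u₀) (ProgX.Base.Spec.pow.spec others frames) u ret) := by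
  have hdf : s.flags .df = false := hinv.1
  have hmx : s.mxcsr &&& 8064 = 8064 := hinv.2
  have hsse : SseOK s := ProgX.Base.sseOK_of_abiInv hinv
  have hsp := hpre.rsp
  u_walk hcode [hμ.vendor] until [cutEpilogue_w] span [ProgX.Base.L.textLo, ProgX.Base.L.textHi] side (v_side)
  · -- 0x102d11 `call log`, call_inv: DF and the MXCSR masks at the callee's entry
    exact inv_of_status_w w_flags hdf w_mxcsr hmx_102ce0
  · -- 0x102d11 `call log`, its precondition: the shadow layer, with the clean stack now ending 16 bytes lower
    have hun : ShadowUntouched u.mem s_102d11.mem := by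
      v_untouched
    refine ⟨?_, hpre.offText⟩
    rw [w_rsp]
    refine (hpre.inv.untouched hun).lower ?_ ?_ ?_
    · u_omega
    · u_omega
    · u_omega
  · -- 0x102d16 (`L.pow.ret2`, libm.c:165), after the return of `log`: what its contract says, in terms of OUR entry state
    simp only [X86.User.Spec.footprint, vspec, w_rsp_102d11] at w_same
    have hsame2 : Mem.SameExcept [⟨(u.reg .rsp).toNat - 56, (u.reg .rsp).toNat⟩] u.mem s_102d11r.mem := by
      u_same
    have w_eq := ProgX.Base.conv_code_eqOn w_code
    have hdf2 : s_102d11r.flags .df = false := (show abiInv _ from w_inv).1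
    have hmx2 : s_102d11r.mxcsr &&& 8064 = 8064 := (show abiInv _ from w_inv).2
    have hsse2 : SseOK s_102d11r := ProgX.Base.sseOK_of_abiInv w_inv
    clear w_same w_post w_code w_inv hsame hdf hmx hsse hinv w_mem_102d11
    u_walk hcode [hμ.vendor] until [cutEpilogue_w] span [ProgX.Base.L.textLo, ProgX.Base.L.textHi] side (v_side)
    · -- 0x102d1b `call exp`, call_inv
      exact inv_of_eq_w w_flags hdf2 w_mxcsr hmx_102d16
    · -- 0x102d1b `call exp`, its precondition: the shadow layer again
      have hun : ShadowUntouched u.mem s_102d1b.mem := by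
        v_untouched
      refine ⟨?_, hpre.offText⟩
      rw [w_rsp]
      refine (hpre.inv.untouched hun).lower ?_ ?_ ?_
      · u_omega
      · u_omega
      · u_omega
    · -- 0x102d20 (`L.pow.ret3`, libm.c:165), after the return of `exp`: `jmp` to the epilogue
      simp only [X86.User.Spec.footprint, vspec, w_rsp_102d1b] at w_same
      have hsame3 : Mem.SameExcept [⟨(u.reg .rsp).toNat - 56, (u.reg .rsp).toNat⟩] u.mem s_102d1br.mem := by
        u_same
      have w_eq := ProgX.Base.conv_code_eqOn w_code
      have hdf3 : s_102d1br.flags .df = false := (show abiInv _ from w_inv).1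
      have hmx3 : s_102d1br.mxcsr &&& 8064 = 8064 := (show abiInv _ from w_inv).2
      clear w_same w_post w_code w_inv hsame2 hdf2 hmx2 hsse2 w_mem_102d1b
      u_walk hcode [hμ.vendor] until [cutEpilogue_w] span [ProgX.Base.L.textLo, ProgX.Base.L.textHi] side (v_side)
      exact from_epilogue_w hμ hcode others frames he_retAddr he_ret_lt he_room he_top he_stack s_102d20 w_rip w_rsp w_kept
        (by u_same) (inv_of_eq_w w_flags hdf3 w_mxcsr hmx3) w_eq
  · -- 0x102cee `jp`: x is a NaN; libm.c:170 `return (x - x) / (x - x)`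
    exact from_epilogue_w hμ hcode others frames he_retAddr he_ret_lt he_room he_top he_stack s_102d01 w_rip w_rsp w_kept
      (by u_same) (inv_of_status_w w_flags hdf w_mxcsr hmx_102d01) w_eq
  · -- 0x102cf0 `jne`: x < 0.0; libm.c:170
    exact from_epilogue_w hμ hcode others frames he_retAddr he_ret_lt he_room he_top he_stack s_102d01 w_rip w_rsp w_kept
      (by u_same) (inv_of_status_w w_flags hdf w_mxcsr hmx_102d01) w_eq
  · -- 0x102cfb `ja`: x == 0.0 and y > 0.0; libm.c:168 `return 0.0`
    exact from_epilogue_w hμ hcode others frames he_retAddr he_ret_lt he_room he_top he_stack s_102d26 w_rip w_rsp w_kept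
      (by u_same) (inv_of_status_w w_flags hdf w_mxcsr hmx_102cf7) w_eq
  · -- x == 0.0 and not y > 0.0; libm.c:170
    exact from_epilogue_w hμ hcode others frames he_retAddr he_ret_lt he_room he_top he_stack s_102d01 w_rip w_rsp w_kept
      (by u_same) (inv_of_status_w w_flags hdf w_mxcsr hmx_102d01) w_eq

end ProgX.Base.Spec.Proved.pow

/-- `pow(x, y)` satisfies its contract: the test of an integer exponent (libm.c:158–160) is walked once; its four failing exits go
to `from_general_w` (`exp(y * log(x))`, `0.0`, NaN), its passing exit calls `pow_int`; every `return` ends in `from_epilogue_w`. The three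
callees get the shadow layer with the clean stack ending 16 bytes lower (`ShadowInv.lower`), and write their own frames only. -/
theorem ProgX.Base.Spec.Proved.pow_ok : ProgX.Base.Spec.pow.Statement := by
  intro Lay hLay μ hμ u₀ hcode h_pow_int h_log h_exp others frames u ret he hpre
  v_entry he
  -- the precondition is the shadow clause alone (FP1 is the convention's `abiInv`: `he_df`, `he_mx`)
  have hpre' : ShadowPre others frames u := hpre
  have hsp := hpre'.rsp
  -- the callees' contracts, instantiated at OUR ghosts (the walker finds `Calls …` hypotheses only)
  have hpi := h_pow_int others frames
  have hlog := h_log others frames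
  have hexp := h_exp others frames
  -- 0x102ca0 … 0x102cda (libm.c:157–160): the spill of `y`, the test `y >= 0.0 && y < 65536.0 && (double) n == y`
  u_walk hcode [hμ.vendor] until [ProgX.Base.Spec.Proved.pow.cutGeneral_w, ProgX.Base.Spec.Proved.pow.cutEpilogue_w]
    span [ProgX.Base.L.textLo, ProgX.Base.L.textHi] side (v_side)
  · -- 0x102d0a `call pow_int`, call_inv
    exact ProgX.Base.Spec.Proved.pow.inv_of_status_w w_flags he_df w_mxcsr hmx_102cd4
  · -- 0x102d0a `call pow_int`, its precondition
    have hun : ShadowUntouched u.mem s_102d0a.mem := by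
      v_untouched
    refine ⟨?_, hpre'.offText⟩
    rw [w_rsp]
    refine (hpre'.inv.untouched hun).lower ?_ ?_ ?_
    · u_omega
    · u_omega
    · u_omega
  · -- 0x102cb5 `jb`: y < 0.0 or NaN
    exact ProgX.Base.Spec.Proved.pow.from_general_w hLay hμ hcode others frames hlog hexp hpre' he_retAddr he_ret_lt he_align he_room he_top
      he_stack s_102cb5 w_rip w_rsp (w_kept.mono_all (by rfl)) (by u_same)
      (ProgX.Base.Spec.Proved.pow.inv_of_status_w w_flags he_df w_mxcsr hmx_102cb1) w_eq
  · -- 0x102cc3 `jbe`: y >= 65536.0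
    exact ProgX.Base.Spec.Proved.pow.from_general_w hLay hμ hcode others frames hlog hexp hpre' he_retAddr he_ret_lt he_align he_room he_top
      he_stack s_102cc3 w_rip w_rsp (w_kept.mono_all (by rfl)) (by u_same)
      (ProgX.Base.Spec.Proved.pow.inv_of_status_w w_flags he_df w_mxcsr hmx_102cbf) w_eq
  · -- 0x102cd8 `jp`: unordered
    exact ProgX.Base.Spec.Proved.pow.from_general_w hLay hμ hcode others frames hlog hexp hpre' he_retAddr he_ret_lt he_align he_room he_top
      he_stack s_102cd8 w_rip w_rsp (w_kept.mono_all (by rfl)) (by u_same)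
      (ProgX.Base.Spec.Proved.pow.inv_of_status_w w_flags he_df w_mxcsr hmx_102cd4) w_eq
  · -- 0x102d0f (`L.pow.ret1`, libm.c:161), after the return of `pow_int`: `jmp` to the epilogue
    simp only [X86.User.Spec.footprint, vspec, w_rsp_102d0a] at w_same
    have hsame1 : Mem.SameExcept [⟨(u.reg .rsp).toNat - 56, (u.reg .rsp).toNat⟩] u.mem s_102d0ar.mem := by
      u_same
    have w_eq := ProgX.Base.conv_code_eqOn w_code
    have hdf1 : s_102d0ar.flags .df = false := (show abiInv _ from w_inv).1
    have hmx1 : s_102d0ar.mxcsr &&& 8064 = 8064 := (show abiInv _ from w_inv).2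
    clear w_same w_post w_code w_inv w_mem_102d0a
    u_walk hcode [hμ.vendor] until [ProgX.Base.Spec.Proved.pow.cutEpilogue_w] span [ProgX.Base.L.textLo, ProgX.Base.L.textHi] side (v_side)
    exact ProgX.Base.Spec.Proved.pow.from_epilogue_w hμ hcode others frames he_retAddr he_ret_lt he_room he_top he_stack s_102d0f w_rip w_rsp
      (w_kept.mono_all (by rfl)) (by u_same)
      (ProgX.Base.Spec.Proved.pow.inv_of_eq_w w_flags hdf1 w_mxcsr hmx_102d0f) w_eq
  · -- 0x102cda `je` not taken: (double) n != y
    exact ProgX.Base.Spec.Proved.pow.from_general_w hLay hμ hcode others frames hlog hexp hpre' he_retAddr he_ret_lt he_align he_room he_top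
      he_stack s_102cda w_rip w_rsp (w_kept.mono_all (by rfl)) (by u_same)
      (ProgX.Base.Spec.Proved.pow.inv_of_status_w w_flags he_df w_mxcsr hmx_102cd4) w_eq
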